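-- pv_equiv track=rewrite | github.com/MaxShroyer/MD_RL_finetune_scripts | MDpi_and_d/train_pid_icons.py | _analyze_class_catalog
-- ===== SOURCE A (Python) =====
-- def _class_name_has_digit(name: str) -> bool:
--     return any(char.isdigit() for char in name)
--
-- def _analyze_class_catalog(catalog: list[tuple[str, str]]) -> tuple[dict[str, list[str]], list[str]]:
--     by_name: dict[str, set[str]] = {}
--     for class_uid, class_name in catalog:
--         if not class_name:
--             continue
--         by_name.setdefault(class_name, set()).add(class_uid or class_name)
--
--     duplicate_names = {
--         class_name: sorted(uids)
--         for class_name, uids in by_name.items()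
--         if len(uids) > 1
--     }
--     numeric_names = sorted(name for name in by_name if _class_name_has_digit(name))
--     return duplicate_names, numeric_names
-- ===== SOURCE B (Python) =====
-- def _analyze_class_catalog(catalog):
--     # dedup names in first-occurrence order, then a per-name scan; no dict-of-sets
--     names = list(dict.fromkeys(name for _, name in catalog if name))
--     duplicate_names = {}
--     for name in names:
--         uids = sorted({uid or name for uid, nm in catalog if nm == name})
--         if len(uids) > 1:
--             duplicate_names[name] = uids
--     numeric_names = sorted(n for n in names if any(c.isdigit() for c in n))
--     return duplicate_names, numeric_names
-- ===== Notes on version B (the rewrite author's own statement) =====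
-- stated objective: simpler
-- what changed: Replaced A's single-pass dict-of-sets grouping by an ordered dedup of the non-empty names followed by a per-name comprehension scan of the catalog (no dict of sets maintained), with numeric names filtered from the same deduped name list.
import Mathlib
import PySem

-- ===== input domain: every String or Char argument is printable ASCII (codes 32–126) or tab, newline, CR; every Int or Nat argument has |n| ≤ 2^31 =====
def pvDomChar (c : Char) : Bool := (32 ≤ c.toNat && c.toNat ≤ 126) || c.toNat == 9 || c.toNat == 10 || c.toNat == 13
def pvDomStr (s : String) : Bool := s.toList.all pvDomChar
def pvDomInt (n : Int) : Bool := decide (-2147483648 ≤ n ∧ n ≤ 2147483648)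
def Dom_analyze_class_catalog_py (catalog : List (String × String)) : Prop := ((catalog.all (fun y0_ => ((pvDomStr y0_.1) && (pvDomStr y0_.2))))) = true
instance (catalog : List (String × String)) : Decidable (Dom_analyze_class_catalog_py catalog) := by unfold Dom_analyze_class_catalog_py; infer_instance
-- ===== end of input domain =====

-- B replaces A's dict-of-sets single-pass grouping by an ordered dedup of names followed by a
-- per-name comprehension scan of the catalog (simpler decomposition, no dict of sets).


-- ===== PORT A =====
def class_name_has_digit_py (name : String) : Bool :=
  name.toList.any (fun c => PySem.Chars.isdigit c)

def analyze_class_catalog_py (catalog : List (String × String)) : (List (String × List String)) × List String :=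
  let by_name : PySem.Dict String (PySem.Set String) :=
    catalog.foldl (fun d p =>
      if p.2 == "" then d
      else d.modify p.2 PySem.Set.empty (fun s => PySem.Set.add s (if p.1 == "" then p.2 else p.1)))
      PySem.Dict.empty
  let duplicate_names : PySem.Dict String (List String) :=
    by_name.items.foldl (fun d it =>
      if it.2.length > 1 then d.insert it.1 (PySem.List.sorted it.2 (fun x => x) false) else d)
      PySem.Dict.empty
  let numeric_names : List String :=
    PySem.List.sorted (by_name.keys.filter (fun n => class_name_has_digit_py n)) (fun x => x) false
  (duplicate_names.items, numeric_names)

-- ===== PORT B =====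
def analyze_class_catalog_py_alt (catalog : List (String × String)) : (List (String × List String)) × List String :=
  let names : List String :=
    PySem.List.dedup ((catalog.filter (fun p => !(p.2 == ""))).map (fun p => p.2))
  let duplicate_names : PySem.Dict String (List String) :=
    names.foldl (fun d name =>
      let uids := PySem.List.sorted
        (PySem.Set.ofList ((catalog.filter (fun p => p.2 == name)).map
          (fun p => if p.1 == "" then name else p.1))) (fun x => x) false
      if uids.length > 1 then d.insert name uids else d)
      PySem.Dict.empty
  let numeric_names : List String :=
    PySem.List.sorted (names.filter (fun n => n.toList.any (fun c => PySem.Chars.isdigit c))) (fun x => x) false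
  (duplicate_names.items, numeric_names)

-- ===== PRECONDITION & SPEC =====
def Spec_analyze_class_catalog_py (catalog : List (String × String)) (out : (List (String × List String)) × List String) : Prop := out = analyze_class_catalog_py_alt catalog
instance (catalog : List (String × String)) (out : (List (String × List String)) × List String) : Decidable (Spec_analyze_class_catalog_py catalog out) := by unfold Spec_analyze_class_catalog_py; infer_instance

-- ===== CLAIM (what is proved, stated in full; the proofs are below) =====
def Claim_equal_analyze_class_catalog_py : Prop := ∀ (catalog : List (String × String)), Dom_analyze_class_catalog_py catalog → Spec_analyze_class_catalog_py catalog (analyze_class_catalog_py catalog)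

-- ===== LEMMAS AND PROOFS =====

-- a foldl whose body skips on p equals a foldl over the filter of ¬p
theorem pv_foldl_skip {α β : Type} (p : α → Bool) (g : β → α → β) :
    ∀ (l : List α) (a : β),
      l.foldl (fun acc x => if p x then acc else g acc x) a
        = (l.filter (fun x => !(p x))).foldl g a := by
  intro l
  induction l with
  | nil => intro a; rfl
  | cons x t ih =>
    intro a
    by_cases h : p x = true <;> simp [h, ih]

-- a foldl whose body acts only when P holds equals a foldl over the filter of P
theorem pv_foldl_keep {α β : Type} (P : α → Prop) [DecidablePred P] (g : β → α → β) :
    ∀ (l : List α) (a : β),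
      l.foldl (fun acc x => if P x then g acc x else acc) a
        = (l.filter (fun x => decide (P x))).foldl g a := by
  intro l
  induction l with
  | nil => intro a; rfl
  | cons x t ih =>
    intro a
    by_cases h : P x <;> simp [h, ih]

-- lookup in the grouping fold: the bucket of n collects exactly the entries with name n
theorem pv_getD_group (sub : String × String → String) :
    ∀ (l : List (String × String)) (d : PySem.Dict String (PySem.Set String)) (n : String),
      (l.foldl (fun d p => d.modify p.2 PySem.Set.empty (fun s => PySem.Set.add s (sub p))) d).getD n PySem.Set.empty
        = (l.filter (fun p => p.2 == n)).foldl (fun s p => PySem.Set.add s (sub p)) (d.getD n PySem.Set.empty) := by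
  intro l
  induction l with
  | nil => intro d n; rfl
  | cons x t ih =>
    intro d n
    rw [List.foldl_cons, ih, PySem.Dict.getD_modify]
    by_cases h : x.2 = n
    · simp [h]
    · have h' : (x.2 == n) = false := by simp [h]
      simp [h', Ne.symm h]

-- proof-only abbreviations: the filtered catalog, A's grouping dict, and B's per-name set
def pvSub (p : String × String) : String := if p.1 == "" then p.2 else p.1

def pvF (catalog : List (String × String)) : List (String × String) :=
  catalog.filter (fun p => !(p.2 == ""))

def pvD (catalog : List (String × String)) : PySem.Dict String (PySem.Set String) :=
  (pvF catalog).foldl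
    (fun d p => d.modify p.2 PySem.Set.empty (fun s => PySem.Set.add s (pvSub p)))
    PySem.Dict.empty

def pvS (catalog : List (String × String)) (n : String) : PySem.Set String :=
  PySem.Set.ofList ((catalog.filter (fun p => p.2 == n)).map (fun p => if p.1 == "" then n else p.1))

theorem pv_byname (catalog : List (String × String)) :
    catalog.foldl (fun d p =>
        if p.2 == "" then d
        else d.modify p.2 PySem.Set.empty
          (fun s => PySem.Set.add s (if p.1 == "" then p.2 else p.1)))
      PySem.Dict.empty = pvD catalog :=
  pv_foldl_skip (fun p => p.2 == "")
    (fun d p => d.modify p.2 PySem.Set.empty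
      (fun s => PySem.Set.add s (if p.1 == "" then p.2 else p.1))) catalog PySem.Dict.empty

theorem pv_keys (catalog : List (String × String)) :
    (pvD catalog).keys = PySem.Set.ofList ((pvF catalog).map (fun p => p.2)) := by
  have h := PySem.Dict.keys_foldl_modify_key (pvF catalog) (fun p => p.2) PySem.Set.empty
    (fun _ p s => PySem.Set.add s (pvSub p)) PySem.Dict.empty
  simpa [pvD, PySem.Set.update_nil_left] using h

theorem pv_nodup (catalog : List (String × String)) : (pvD catalog).keys.Nodup := by
  have h := PySem.Dict.nodup_keys_foldl_modify_key (pvF catalog) (fun p => p.2) PySem.Set.empty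
    (fun _ p s => PySem.Set.add s (pvSub p)) PySem.Dict.empty (by simp [PySem.Dict.empty])
  simpa [pvD] using h

theorem pv_keys_ne (catalog : List (String × String)) :
    ∀ k ∈ (pvD catalog).keys, ¬(k = "") := by
  intro k hk
  rw [pv_keys, PySem.Set.mem_ofList] at hk
  obtain ⟨p, hp, hpk⟩ := List.mem_map.mp hk
  have := (List.mem_filter.mp hp).2
  simp only [Bool.not_eq_eq_eq_not, Bool.not_true, beq_eq_false_iff_ne] at this
  intro h; exact this (hpk.trans h)

theorem pv_getD (catalog : List (String × String)) (n : String) (hn : ¬ n = "") :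
    (pvD catalog).getD n PySem.Set.empty = pvS catalog n := by
  unfold pvD
  rw [pv_getD_group]
  have hemp : (PySem.Dict.empty : PySem.Dict String (PySem.Set String)).getD n PySem.Set.empty
      = PySem.Set.empty := rfl
  rw [hemp]
  have hff : (pvF catalog).filter (fun p => p.2 == n) = catalog.filter (fun p => p.2 == n) := by
    unfold pvF
    rw [List.filter_filter]
    refine List.filter_congr ?_
    intro x _
    by_cases h : x.2 = n
    · simp [h, hn]
    · simp [h]
  rw [hff, ← PySem.Set.update_map_eq_foldl_add,
    show (PySem.Set.empty : PySem.Set String) = [] from rfl, PySem.Set.update_nil_left]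
  unfold pvS
  refine congrArg PySem.Set.ofList (List.map_congr_left ?_)
  intro a ha
  have h2 : a.2 = n := by
    have := (List.mem_filter.mp ha).2
    simpa using this
  simp [pvSub, h2]

theorem pv_dupA (catalog : List (String × String)) :
    ((pvD catalog).items.foldl (fun d it =>
        if it.2.length > 1 then d.insert it.1 (PySem.List.sorted it.2 (fun x => x) false) else d)
      PySem.Dict.empty).items
      = (((pvD catalog).keys.filter
            (fun k => decide (((pvD catalog).getD k PySem.Set.empty).length > 1))).map
          (fun k => (k, PySem.List.sorted ((pvD catalog).getD k PySem.Set.empty) (fun x => x) false))) := by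
  have hkeep : ((pvD catalog).items.foldl (fun d it =>
      if it.2.length > 1 then d.insert it.1 (PySem.List.sorted it.2 (fun x => x) false) else d)
      PySem.Dict.empty)
      = (((pvD catalog).items.filter (fun it => decide (it.2.length > 1))).foldl
          (fun d it => d.insert it.1 (PySem.List.sorted it.2 (fun x => x) false))
          PySem.Dict.empty) :=
    pv_foldl_keep (fun it : String × PySem.Set String => it.2.length > 1)
      (fun d it => d.insert it.1 (PySem.List.sorted it.2 (fun x => x) false))
      (pvD catalog).items PySem.Dict.empty
  rw [hkeep]
  rw [PySem.Dict.items_eq_map_keys (pvD catalog) (pv_nodup catalog) PySem.Set.empty]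
  rw [List.filter_map, List.foldl_map]
  have hnd : (((pvD catalog).keys.filter
      ((fun it : String × PySem.Set String => decide (it.2.length > 1)) ∘
        (fun k => (k, (pvD catalog).getD k PySem.Set.empty)))).map (fun k => k)).Nodup := by
    rw [List.map_id']
    exact List.Nodup.sublist List.filter_sublist (pv_nodup catalog)
  have h := PySem.Dict.items_foldl_insert_fresh
    ((pvD catalog).keys.filter
      ((fun it : String × PySem.Set String => decide (it.2.length > 1)) ∘
        (fun k => (k, (pvD catalog).getD k PySem.Set.empty))))
    (fun k => k)
    (fun k => PySem.List.sorted ((pvD catalog).getD k PySem.Set.empty) (fun x => x) false)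
    PySem.Dict.empty (fun a _ => rfl) hnd
  rw [h]
  simp [PySem.Dict.empty, Function.comp_def]

theorem pv_dupB (catalog : List (String × String)) :
    ((PySem.List.dedup ((catalog.filter (fun p => !(p.2 == ""))).map (fun p => p.2))).foldl
        (fun d name =>
          let uids := PySem.List.sorted
            (PySem.Set.ofList ((catalog.filter (fun p => p.2 == name)).map
              (fun p => if p.1 == "" then name else p.1))) (fun x => x) false
          if uids.length > 1 then d.insert name uids else d)
        PySem.Dict.empty).items
      = (((PySem.List.dedup ((catalog.filter (fun p => !(p.2 == ""))).map (fun p => p.2))).filter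
            (fun n => decide ((PySem.List.sorted (pvS catalog n) (fun x => x) false).length > 1))).map
          (fun n => (n, PySem.List.sorted (pvS catalog n) (fun x => x) false))) := by
  have h1 := pv_foldl_keep
    (fun n => (PySem.List.sorted (pvS catalog n) (fun x => x) false).length > 1)
    (fun d n => d.insert n (PySem.List.sorted (pvS catalog n) (fun x => x) false))
    (PySem.List.dedup ((catalog.filter (fun p => !(p.2 == ""))).map (fun p => p.2)))
    PySem.Dict.empty
  have h2 : ((PySem.List.dedup ((catalog.filter (fun p => !(p.2 == ""))).map (fun p => p.2))).foldl
      (fun d name =>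
        let uids := PySem.List.sorted
          (PySem.Set.ofList ((catalog.filter (fun p => p.2 == name)).map
            (fun p => if p.1 == "" then name else p.1))) (fun x => x) false
        if uids.length > 1 then d.insert name uids else d)
      PySem.Dict.empty)
      = (((PySem.List.dedup ((catalog.filter (fun p => !(p.2 == ""))).map (fun p => p.2))).filter
          (fun n => decide ((PySem.List.sorted (pvS catalog n) (fun x => x) false).length > 1))).foldl
          (fun d n => d.insert n (PySem.List.sorted (pvS catalog n) (fun x => x) false))
          PySem.Dict.empty) := h1
  rw [h2]
  have hnd : (((PySem.List.dedup ((catalog.filter (fun p => !(p.2 == ""))).map (fun p => p.2))).filter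
      (fun n => decide ((PySem.List.sorted (pvS catalog n) (fun x => x) false).length > 1))).map
        (fun k => k)).Nodup := by
    rw [List.map_id']
    exact List.Nodup.sublist List.filter_sublist (PySem.List.nodup_dedup _)
  have h := PySem.Dict.items_foldl_insert_fresh
    ((PySem.List.dedup ((catalog.filter (fun p => !(p.2 == ""))).map (fun p => p.2))).filter
      (fun n => decide ((PySem.List.sorted (pvS catalog n) (fun x => x) false).length > 1)))
    (fun k => k)
    (fun n => PySem.List.sorted (pvS catalog n) (fun x => x) false)
    PySem.Dict.empty (fun a _ => rfl) hnd
  rw [h]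
  simp [PySem.Dict.empty]

theorem analyze_class_catalog_py_spec_aux (catalog : List (String × String)) :
    analyze_class_catalog_py catalog = analyze_class_catalog_py_alt catalog := by
  simp only [analyze_class_catalog_py, analyze_class_catalog_py_alt]
  rw [pv_byname catalog]
  have hnames : PySem.List.dedup ((catalog.filter (fun p => !(p.2 == ""))).map (fun p => p.2))
      = (pvD catalog).keys := by
    rw [PySem.List.dedup_eq_ofList, pv_keys]; rfl
  refine Prod.ext ?_ ?_
  · rw [pv_dupA catalog, pv_dupB catalog, hnames]
    have hfilter : ((pvD catalog).keys.filter
        (fun k => decide (((pvD catalog).getD k PySem.Set.empty).length > 1)))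
        = ((pvD catalog).keys.filter
            (fun n => decide ((PySem.List.sorted (pvS catalog n) (fun x => x) false).length > 1))) := by
      refine List.filter_congr ?_
      intro k hk
      rw [pv_getD catalog k (pv_keys_ne catalog k hk), PySem.List.length_sorted]
    rw [hfilter]
    refine List.map_congr_left ?_
    intro k hk
    have hkk := (List.mem_filter.mp hk).1
    rw [pv_getD catalog k (pv_keys_ne catalog k hkk)]
  · rw [hnames]
    simp [class_name_has_digit_py]

-- ===== VERDICT (by name: the statement is the Claim_ definition above) =====
theorem analyze_class_catalog_py_spec : Claim_equal_analyze_class_catalog_py := by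
  intro catalog _
  exact analyze_class_catalog_py_spec_aux catalog
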